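-- pv_equiv track=rewrite | github.com/kwz219/APIRepair | DataProcess/build_datatype.py | MASKerror
-- ===== SOURCE A (Python) =====
-- def reduce_MASK(seq):
--     new_seq=[]
--     last_MASK=False
--     for ele in seq:
--         if ele=='[MASK]':
--             if last_MASK!=True:
--                 new_seq.append('[MASK]')
--                 last_MASK=True
--         else:
--             new_seq.append(ele)
--             last_MASK=False
--     return new_seq
--
-- def MASKerror(seq,labels):
--     assert len(seq)==len(labels)
--     masked_seq=[]
--     for i in range(len(labels)):
--         label=labels[i]
--         if label=="4":
--             masked_seq.append('[MASK]')
--             masked_seq.append(seq[i])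
--         elif label=="3":
--             masked_seq.append(seq[i])
--             masked_seq.append('[MASK]')
--         elif label=="0":
--             masked_seq.append(seq[i])
--         elif label=="1":
--             masked_seq.append('[MASK]')
--         elif label=="2":
--             masked_seq.append('[MASK]')
--     finalseq=reduce_MASK(masked_seq)
--     return finalseq
-- ===== SOURCE B (Python) =====
-- def MASKerror(seq, labels):
--     assert len(seq) == len(labels)
--     out = []
--     last_mask = False
--
--     def emit(tok):
--         nonlocal last_mask
--         if tok == '[MASK]':
--             if not last_mask:
--                 out.append('[MASK]')
--                 last_mask = True
--         else:
--             out.append(tok)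
--             last_mask = False
--
--     for tok, label in zip(seq, labels):
--         if label == "4":
--             toks = ['[MASK]', tok]
--         elif label == "3":
--             toks = [tok, '[MASK]']
--         elif label == "0":
--             toks = [tok]
--         elif label == "1" or label == "2":
--             toks = ['[MASK]']
--         else:
--             toks = []
--         for t in toks:
--             emit(t)
--     return out
-- ===== Notes on version B (the rewrite author's own statement) =====
-- stated objective: simpler
-- what changed: B fuses A's two passes into a single pass over zip(seq, labels) with an emit helper that suppresses consecutive '[MASK]' tokens on the fly, eliminating the intermediate masked_seq list and the separate reduce_MASK scan.
import Mathlib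
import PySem

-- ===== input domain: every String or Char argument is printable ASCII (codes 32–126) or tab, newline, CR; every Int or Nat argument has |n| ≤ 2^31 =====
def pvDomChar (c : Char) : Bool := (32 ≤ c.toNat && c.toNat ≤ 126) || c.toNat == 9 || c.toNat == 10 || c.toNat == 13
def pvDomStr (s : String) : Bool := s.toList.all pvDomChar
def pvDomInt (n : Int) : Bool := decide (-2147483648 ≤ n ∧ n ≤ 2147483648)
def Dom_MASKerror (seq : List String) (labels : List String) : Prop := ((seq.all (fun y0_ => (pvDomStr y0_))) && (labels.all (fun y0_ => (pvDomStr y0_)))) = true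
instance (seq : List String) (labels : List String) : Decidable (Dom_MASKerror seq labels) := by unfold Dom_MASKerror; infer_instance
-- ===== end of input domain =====

-- B fuses A's two passes (build masked_seq, then reduce_MASK) into a single pass over
-- zip(seq, labels) that suppresses consecutive '[MASK]' tokens on the fly (objective: simpler).


-- ===== PORT A =====
-- reduce_MASK: scan with (new_seq, last_MASK) state
def pvReduceMASK (seq : List String) : List String :=
  (seq.foldl (fun (st : List String × Bool) ele =>
      if ele = "[MASK]" then
        if st.2 ≠ true then (st.1 ++ ["[MASK]"], true) else st
      else (st.1 ++ [ele], false))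
    ([], false)).1

-- the index loop building masked_seq, then the separate reduce_MASK pass;
-- pyGetD's default is never read: Pre_ makes every index i < len in range
def MASKerror (seq : List String) (labels : List String) : List String :=
  let masked := (PySem.List.pyRange 0 (labels.length : Int) 1).foldl
    (fun acc i =>
      let label := PySem.List.pyGetD labels i ""
      if label = "4" then (acc ++ ["[MASK]"]) ++ [PySem.List.pyGetD seq i ""]
      else if label = "3" then (acc ++ [PySem.List.pyGetD seq i ""]) ++ ["[MASK]"]
      else if label = "0" then acc ++ [PySem.List.pyGetD seq i ""]
      else if label = "1" then acc ++ ["[MASK]"]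
      else if label = "2" then acc ++ ["[MASK]"]
      else acc) []
  pvReduceMASK masked

-- ===== PORT B =====
-- emit(tok): append unless a '[MASK]' follows a '[MASK]'
def pvEmit (st : List String × Bool) (tok : String) : List String × Bool :=
  if tok = "[MASK]" then
    if !st.2 then (st.1 ++ ["[MASK]"], true) else st
  else (st.1 ++ [tok], false)

-- tokens contributed by one (tok, label) pair
def pvToks (tok : String) (label : String) : List String :=
  if label = "4" then ["[MASK]", tok]
  else if label = "3" then [tok, "[MASK]"]
  else if label = "0" then [tok]
  else if label = "1" ∨ label = "2" then ["[MASK]"]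
  else []

def MASKerror_alt (seq : List String) (labels : List String) : List String :=
  ((seq.zip labels).foldl
    (fun st p => (pvToks p.1 p.2).foldl pvEmit st) ([], false)).1

-- ===== PRECONDITION & SPEC =====
-- A asserts len(seq)==len(labels) and raises AssertionError otherwise
def Pre_MASKerror (seq : List String) (labels : List String) : Prop := seq.length = labels.length
instance (seq : List String) (labels : List String) : Decidable (Pre_MASKerror seq labels) := by unfold Pre_MASKerror; infer_instance

def pvWitness_MASKerror : List String × List String := (["a", "b", "c"], ["4", "0", "2"])

def Spec_MASKerror (seq : List String) (labels : List String) (out : List String) : Prop := out = MASKerror_alt seq labels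
instance (seq : List String) (labels : List String) (out : List String) : Decidable (Spec_MASKerror seq labels out) := by unfold Spec_MASKerror; infer_instance

-- ===== CLAIM (what is proved, stated in full; the proofs are below) =====
def Claim_equal_MASKerror : Prop := ∀ (seq : List String) (labels : List String), Dom_MASKerror seq labels → Pre_MASKerror seq labels → Spec_MASKerror seq labels (MASKerror seq labels)

-- ===== LEMMAS AND PROOFS =====

-- A's reduce step is exactly B's emit
lemma pv_step_eq_emit :
    (fun (st : List String × Bool) ele =>
      if ele = "[MASK]" then
        if st.2 ≠ true then (st.1 ++ ["[MASK]"], true) else st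
      else (st.1 ++ [ele], false)) = pvEmit := by
  funext st ele
  simp only [pvEmit]
  cases h : st.2 <;> simp

-- A's per-index if-chain appends exactly pvToks
lemma pv_chain_eq_toks (acc : List String) (tok label : String) :
    (if label = "4" then (acc ++ ["[MASK]"]) ++ [tok]
     else if label = "3" then (acc ++ [tok]) ++ ["[MASK]"]
     else if label = "0" then acc ++ [tok]
     else if label = "1" then acc ++ ["[MASK]"]
     else if label = "2" then acc ++ ["[MASK]"]
     else acc) = acc ++ pvToks tok label := by
  simp only [pvToks]
  split_ifs with h1 h2 h3 h4 h5 h6 h7 <;> simp_all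

-- the index loop builds the flatMap of pvToks over the zip
lemma pv_build_eq_flatMap :
    ∀ (labels seq : List String), seq.length = labels.length → ∀ (acc : List String),
    (List.range labels.length).foldl
      (fun acc k => acc ++ pvToks (seq.getD k "") (labels.getD k "")) acc
    = acc ++ (seq.zip labels).flatMap (fun p => pvToks p.1 p.2) := by
  intro labels
  induction labels with
  | nil => intro seq h acc; simp_all [List.length_eq_zero_iff.mp h]
  | cons l ls ih =>
    intro seq h acc
    match seq, h with
    | s :: ss, h =>
      have hlen : ss.length = ls.length := by simpa using h
      simp only [List.length_cons, List.range_succ_eq_map, List.foldl_cons, List.foldl_map,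
        List.getD_cons_zero, List.getD_cons_succ, List.zip_cons_cons, List.flatMap_cons]
      rw [ih ss hlen]
      simp [List.append_assoc]

-- folding emit over a flatMap = the nested per-pair fold of B
lemma pv_foldl_flatMap {α : Type} (g : α → List String) :
    ∀ (xs : List α) (st : List String × Bool),
    ((xs.flatMap g).foldl pvEmit st) = xs.foldl (fun st p => (g p).foldl pvEmit st) st := by
  intro xs
  induction xs with
  | nil => intro st; rfl
  | cons x xs ih => intro st; simp [List.foldl_append, ih]

-- ===== VERDICT (by name: the statement is the Claim_ definition above) =====
theorem MASKerror_spec : Claim_equal_MASKerror := by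
  intro seq labels _ hpre
  show MASKerror seq labels = MASKerror_alt seq labels
  unfold MASKerror MASKerror_alt pvReduceMASK
  rw [pv_step_eq_emit]
  have hrange : (PySem.List.pyRange 0 (labels.length : Int) 1).foldl
      (fun acc i =>
        let label := PySem.List.pyGetD labels i ""
        if label = "4" then (acc ++ ["[MASK]"]) ++ [PySem.List.pyGetD seq i ""]
        else if label = "3" then (acc ++ [PySem.List.pyGetD seq i ""]) ++ ["[MASK]"]
        else if label = "0" then acc ++ [PySem.List.pyGetD seq i ""]
        else if label = "1" then acc ++ ["[MASK]"]
        else if label = "2" then acc ++ ["[MASK]"]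
        else acc) []
      = (seq.zip labels).flatMap (fun p => pvToks p.1 p.2) := by
    rw [PySem.List.pyRange_zero_natCast, List.foldl_map]
    have : ∀ (acc : List String) (k : Nat),
        (let label := PySem.List.pyGetD labels (k : Int) ""
         if label = "4" then (acc ++ ["[MASK]"]) ++ [PySem.List.pyGetD seq (k : Int) ""]
         else if label = "3" then (acc ++ [PySem.List.pyGetD seq (k : Int) ""]) ++ ["[MASK]"]
         else if label = "0" then acc ++ [PySem.List.pyGetD seq (k : Int) ""]
         else if label = "1" then acc ++ ["[MASK]"]
         else if label = "2" then acc ++ ["[MASK]"]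
         else acc)
        = acc ++ pvToks (seq.getD k "") (labels.getD k "") := by
      intro acc k
      simp only [PySem.List.pyGetD_natCast]
      exact pv_chain_eq_toks acc (seq.getD k "") (labels.getD k "")
    simp only [this]
    simpa using pv_build_eq_flatMap labels seq hpre []
  rw [hrange]
  exact congrArg Prod.fst (pv_foldl_flatMap (fun p => pvToks p.1 p.2) (seq.zip labels) ([], false))
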